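-- pv_equiv track=rewrite | github.com/MECEN-TOURS/SC-2020-2021 | Seance03/auxiliaire.py | genere_etats
-- ===== SOURCE A (Python) =====
-- import copy
-- from typing import Callable, Dict, List, Literal, Tuple, NewType
--
-- Cote = Literal["Gauche", "Droite"]
--
-- Personnage = Literal["Berger", "Loup", "Mouton", "Choux"]
--
-- Etat = NewType("Etat", Dict[Personnage, Cote])
--
-- def genere_etats(clefs: List[Personnage], valeurs: List[Cote]) -> List[Etat]:
--     """Genere les etats correspondant au problème de la traversée.
--
-- Exemples:
-- >>> genere_etats(clefs=["Berger", "Loup"], valeurs=["Gauche", "Droite"])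
-- [
--     {'Berger': 'Gauche', 'Loup': 'Gauche'},
--     {'Berger': 'Gauche', 'Loup': 'Droite'},
--     {'Berger': 'Droite', 'Loup': 'Gauche'},
--     {'Berger': 'Droite', 'Loup': 'Droite'}
-- ]
-- """
--     if not clefs:
--         vide: Etat = Etat({})
--         return [vide]
--     else:
--         intermediaire = genere_etats(clefs=clefs[:-1], valeurs=valeurs)
--         resultat = list()
--         for etat in intermediaire:
--             for valeur in valeurs:
--                 nouveau = copy.deepcopy(etat)
--                 nouveau[clefs[-1]] = valeur
--                 resultat.append(nouveau)
--         return resultat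
-- ===== SOURCE B (Python) =====
-- def genere_etats(clefs, valeurs):
--     """Non-recursive re-implementation: enumerate i in range(v**n) and decode i as an
--     n-digit base-v number (big-endian, so the last key varies fastest)."""
--     n = len(clefs)
--     v = len(valeurs)
--     resultat = []
--     for i in range(v ** n):
--         etat = dict((clef, valeurs[(i // v ** (n - 1 - j)) % v]) for j, clef in enumerate(clefs))
--         resultat.append(etat)
--     return resultat
-- ===== Notes on version B (the rewrite author's own statement) =====
-- stated objective: alternative
-- what changed: Replaced A's recursion on clefs[:-1] with deep-copied dict accumulation by a single non-recursive loop over range(len(valeurs)**len(clefs)) that decodes each counter as a big-endian base-len(valeurs) number, building each dict directly (last key varies fastest, same order).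
import Mathlib
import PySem

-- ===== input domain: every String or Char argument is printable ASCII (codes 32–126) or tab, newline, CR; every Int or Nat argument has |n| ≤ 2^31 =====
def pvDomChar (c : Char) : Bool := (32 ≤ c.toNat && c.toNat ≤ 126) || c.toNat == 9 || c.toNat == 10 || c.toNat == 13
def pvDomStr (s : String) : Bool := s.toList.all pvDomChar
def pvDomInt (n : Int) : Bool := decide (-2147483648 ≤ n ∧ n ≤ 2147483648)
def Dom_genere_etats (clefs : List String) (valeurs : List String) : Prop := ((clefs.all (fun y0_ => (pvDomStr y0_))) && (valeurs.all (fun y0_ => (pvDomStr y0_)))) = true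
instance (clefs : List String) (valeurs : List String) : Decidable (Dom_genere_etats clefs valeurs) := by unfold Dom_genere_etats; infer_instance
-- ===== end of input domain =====

-- B replaces A's recursion on clefs[:-1] by a single loop over range(len(valeurs)**len(clefs)),
-- decoding each counter value as a big-endian base-len(valeurs) number (objective: alternative, non-recursive).

-- ===== PORT A =====
-- Literal port of A: recursion on clefs[:-1]; nested loops append deep-copied dicts with clefs[-1] set.
def genere_etats (clefs : List String) (valeurs : List String) : List (List (String × String)) :=
  if h : clefs = [] then [[]]
  else
    let inter := genere_etats (PySem.List.slice clefs none (some (-1))) valeurs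
    -- clefs ≠ [] here, so clefs[-1] cannot raise; getD's default is never used
    let k := (PySem.List.pyGet? clefs (-1)).getD ""
    inter.foldl (fun res etat =>
      valeurs.foldl (fun res valeur =>
        res ++ [(PySem.Dict.insert (PySem.Dict.mk etat) k valeur).items]) res) []
termination_by clefs.length
decreasing_by
  rw [PySem.List.slice_to_neg_one, List.length_dropLast]
  cases clefs with
  | nil => exact absurd rfl h
  | cons a t => simp

-- ===== PORT B =====
-- Literal port of Source B: for i in range(v**n), each state is dict((clef, valeurs[digit j of i]) for
-- j, clef in enumerate(clefs)), digits of i read in base v big-endian. The decoded digit is always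
-- in range in the Python (the loop is empty when v = 0 and n > 0), so getD's default is never used;
-- the exponent n - 1 - j is nonnegative in the Python, so Nat subtraction is exact.
def genere_etats_alt (clefs : List String) (valeurs : List String) : List (List (String × String)) :=
  let n := clefs.length
  let v := valeurs.length
  (List.range (v ^ n)).foldl (fun resultat i =>
    resultat ++ [(PySem.Dict.ofList ((PySem.List.enumerate clefs).map (fun p =>
        (p.2, valeurs.getD (i / v ^ (n - 1 - p.1.toNat) % v) "")))).items]) []

-- ===== PRECONDITION & SPEC =====
def Spec_genere_etats (clefs : List String) (valeurs : List String) (out : List (List (String × String))) : Prop := out = genere_etats_alt clefs valeurs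
instance (clefs : List String) (valeurs : List String) (out : List (List (String × String))) : Decidable (Spec_genere_etats clefs valeurs out) := by unfold Spec_genere_etats; infer_instance

-- ===== CLAIM (what is proved, stated in full; the proofs are below) =====
def Claim_equal_genere_etats : Prop := ∀ (clefs : List String) (valeurs : List String), Dom_genere_etats clefs valeurs → Spec_genere_etats clefs valeurs (genere_etats clefs valeurs)

-- ===== LEMMAS AND PROOFS =====

-- the dict B builds for counter value i
def pvRow (clefs : List String) (valeurs : List String) (i : Nat) : PySem.Dict String String :=
  PySem.Dict.ofList ((PySem.List.enumerate clefs).map (fun p =>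
    (p.2, valeurs.getD (i / valeurs.length ^ (clefs.length - 1 - p.1.toNat) % valeurs.length) "")))

theorem alt_eq_map (clefs valeurs : List String) :
    genere_etats_alt clefs valeurs
      = (List.range (valeurs.length ^ clefs.length)).map (fun i => (pvRow clefs valeurs i).items) := by
  unfold genere_etats_alt pvRow
  rw [PySem.List.foldl_append_singleton_eq_map]
  simp

theorem range_mul_flatMap (a b : Nat) :
    List.range (a * b) = (List.range a).flatMap (fun q => (List.range b).map (fun r => q * b + r)) := by
  induction a with
  | zero => simp
  | succ a ih =>
    rw [Nat.succ_mul, List.range_add, List.range_succ, List.flatMap_append, ← ih]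
    simp [Nat.mul_comm]

theorem map_getD_range {α β : Type} (xs : List α) (f : α → β) (d : α) :
    (List.range xs.length).map (fun r => f (xs.getD r d)) = xs.map f := by
  apply List.ext_getElem
  · simp
  · intro i h1 h2
    simp [List.getD_eq_getElem?_getD, List.getElem?_eq_getElem (by simpa using h2)]

theorem ofList_foldl {κ ν : Type} [BEq κ] (l : List (κ × ν)) :
    PySem.Dict.ofList l = l.foldl (fun d p => PySem.Dict.insert d p.1 p.2) (PySem.Dict.mk []) := rfl

theorem row_snoc (ds : List String) (k : String) (valeurs : List String) (q r : Nat)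
    (hr : r < valeurs.length) :
    pvRow (ds ++ [k]) valeurs (q * valeurs.length + r)
      = PySem.Dict.insert (pvRow ds valeurs q) k (valeurs.getD r "") := by
  have hv : 0 < valeurs.length := Nat.lt_of_le_of_lt (Nat.zero_le r) hr
  unfold pvRow
  rw [ofList_foldl, ofList_foldl, PySem.List.enumerate_append, List.map_append, List.foldl_append]
  have hdig : (q * valeurs.length + r) / valeurs.length ^ ((ds ++ [k]).length - 1 - ds.length) % valeurs.length = r := by
    simp [Nat.mod_eq_of_lt hr]
  simp only [PySem.List.enumerate_cons, PySem.List.enumerate_nil, List.map_cons, List.map_nil,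
    List.foldl_cons, List.foldl_nil, Int.zero_add, Int.toNat_natCast, hdig]
  congr 1
  apply congrArg (List.foldl _ _)
  apply List.map_congr_left
  intro p hp
  obtain ⟨j, hjm, hpj⟩ := (PySem.List.mem_enumerate_iff _ _ _).mp hp
  subst hpj
  simp only [Int.zero_add, Int.toNat_natCast]
  congr 2
  have he : (ds ++ [k]).length - 1 - j = (ds.length - 1 - j) + 1 := by
    simp only [List.length_append, List.length_cons, List.length_nil]
    omega
  rw [he, pow_succ, Nat.mul_comm (valeurs.length ^ (ds.length - 1 - j)) valeurs.length,
    ← Nat.div_div_eq_div_mul]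
  congr 2
  rw [Nat.mul_comm q valeurs.length, Nat.mul_add_div hv, Nat.div_eq_of_lt hr, Nat.add_zero]

theorem A_snoc (ds : List String) (k : String) (valeurs : List String) :
    genere_etats (ds ++ [k]) valeurs
      = (genere_etats ds valeurs).flatMap
          (fun e => valeurs.map (fun v => (PySem.Dict.insert (PySem.Dict.mk e) k v).items)) := by
  rw [genere_etats]
  have hne : ds ++ [k] ≠ [] := by simp
  simp only [hne, dite_false, PySem.List.slice_to_neg_one, List.dropLast_concat,
    PySem.List.pyGet?_neg_one_append_singleton, Option.getD_some]
  rw [PySem.List.foldl_congr_mem _ _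
    (fun res etat => res ++ valeurs.map (fun v => (PySem.Dict.insert (PySem.Dict.mk etat) k v).items)) []
    (by intro acc x hx; rw [PySem.List.foldl_append_singleton_eq_map])]
  rw [PySem.List.foldl_append_eq_flatMap]
  simp

theorem alt_snoc (ds : List String) (k : String) (valeurs : List String) :
    genere_etats_alt (ds ++ [k]) valeurs
      = (genere_etats_alt ds valeurs).flatMap
          (fun e => valeurs.map (fun v => (PySem.Dict.insert (PySem.Dict.mk e) k v).items)) := by
  rw [alt_eq_map, alt_eq_map]
  have hpow : valeurs.length ^ (ds ++ [k]).length = valeurs.length ^ ds.length * valeurs.length := by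
    simp [pow_succ]
  rw [hpow, range_mul_flatMap, List.map_flatMap, List.flatMap_map]
  apply List.flatMap_congr
  intro q hq
  rw [List.map_map]
  have : ∀ r ∈ List.range valeurs.length,
      (pvRow (ds ++ [k]) valeurs (q * valeurs.length + r)).items
        = (PySem.Dict.insert (pvRow ds valeurs q) k (valeurs.getD r "")).items := by
    intro r hr
    rw [row_snoc ds k valeurs q r (List.mem_range.mp hr)]
  rw [List.map_congr_left (fun r hr => by
    simp only [Function.comp]
    exact this r hr)]
  exact map_getD_range valeurs (fun v => (PySem.Dict.insert (pvRow ds valeurs q) k v).items) ""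

-- ===== VERDICT (by name: the statement is the Claim_ definition above) =====
theorem genere_etats_spec : Claim_equal_genere_etats := by
  intro clefs valeurs h
  clear h
  unfold Spec_genere_etats
  induction clefs using List.reverseRecOn with
  | nil => simp [genere_etats, genere_etats_alt, PySem.List.enumerate_nil, ofList_foldl]
  | append_singleton ds k ih => rw [A_snoc, alt_snoc, ih]
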